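-- pv_equiv track=rewrite | github.com/SapienzaNLP/wsd-hard-benchmark | evaluation/do_majority_voting.py | do_majority_voting
-- ===== SOURCE A (Python) =====
-- def do_majority_voting(gold_data, system_data, system_ranking, use_system_ranking=False):
--     keys = {}
--
--     for gold_instance_id, gold_sense_keys in gold_data.items():
--         answers = {}
--
--         for system_name, system_predictions in system_data.items():
--             if gold_instance_id not in system_predictions:
--                 continue
--
--             system_sense_keys = system_predictions[gold_instance_id]
--             for system_sense_key in system_sense_keys:
--                 if system_sense_key not in answers:
--                     answers[system_sense_key] = 0
--
--                 if use_system_ranking: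
--                     answers[system_sense_key] += system_ranking[system_name]
--                 else:
--                     answers[system_sense_key] += 1
--
--             majority_key = max(answers, key=answers.get)
--             keys[gold_instance_id] = majority_key
--
--     return keys
-- ===== SOURCE B (Python) =====
-- def do_majority_voting(gold_data, system_data, system_ranking, use_system_ranking=False):
--     # Ballot-based: flatten all predictions into one weighted vote list per gold
--     # instance, then elect each winner by summing weights over the raw ballot for
--     # every candidate in first-appearance order (no per-instance tally dict).
--     ballots = {}
--     for system_name, system_predictions in system_data.items():
--         for gold_id, sense_keys in system_predictions.items():
--             if gold_id in gold_data:
--                 for sense_key in sense_keys: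
--                     weight = system_ranking[system_name] if use_system_ranking else 1
--                     ballots.setdefault(gold_id, []).append((sense_key, weight))
--     keys = {}
--     for gold_id in gold_data:
--         if gold_id in ballots:
--             ballot = ballots[gold_id]
--             candidates = []
--             for sense_key, _ in ballot:
--                 if sense_key not in candidates:
--                     candidates.append(sense_key)
--             keys[gold_id] = max(candidates,
--                                 key=lambda c: sum(w for s, w in ballot if s == c))
--     return keys
-- ===== Notes on version B (the rewrite author's own statement) =====
-- stated objective: alternative
-- what changed: A tallies votes per gold instance in a counter dict while scanning systems and recomputes an argmax after every contributing system; B keeps no tally at all: it flattens all predictions into one raw weighted ballot list per gold instance, then elects each winner by extracting the candidates in first-appearance order and summing weights over the raw ballot per candidate.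
import Mathlib
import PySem

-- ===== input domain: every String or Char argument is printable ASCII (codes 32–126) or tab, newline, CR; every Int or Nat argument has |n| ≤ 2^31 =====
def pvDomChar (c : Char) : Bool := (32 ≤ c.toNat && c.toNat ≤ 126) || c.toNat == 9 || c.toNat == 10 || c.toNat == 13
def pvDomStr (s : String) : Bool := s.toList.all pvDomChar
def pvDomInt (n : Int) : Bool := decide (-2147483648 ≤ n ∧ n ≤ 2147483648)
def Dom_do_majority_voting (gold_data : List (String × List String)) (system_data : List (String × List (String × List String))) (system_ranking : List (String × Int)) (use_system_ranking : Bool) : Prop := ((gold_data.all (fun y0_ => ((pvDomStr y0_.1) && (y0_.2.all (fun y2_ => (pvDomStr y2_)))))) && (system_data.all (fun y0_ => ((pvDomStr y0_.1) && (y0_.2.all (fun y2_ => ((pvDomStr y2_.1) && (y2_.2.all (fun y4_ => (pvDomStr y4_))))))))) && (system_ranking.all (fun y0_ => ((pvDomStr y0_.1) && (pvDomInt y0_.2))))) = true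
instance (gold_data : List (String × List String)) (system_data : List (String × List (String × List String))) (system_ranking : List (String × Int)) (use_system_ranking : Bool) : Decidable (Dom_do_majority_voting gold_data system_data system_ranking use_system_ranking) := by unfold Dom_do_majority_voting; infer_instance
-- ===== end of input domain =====

-- B replaces A's per-instance counter dict (tallied while scanning systems, with an argmax
-- recomputed after every contributing system) by a tally-free ballot election: one pass
-- flattens all predictions into a raw weighted vote list per gold instance, a second pass
-- elects each winner by summing weights over the raw ballot for each candidate in
-- first-appearance order; the dict parameters are association lists via PySem.Dict.ofList.

-- ===== PORT A =====
-- one iteration of A's inner 'for system_sense_key in system_sense_keys' loop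
def pvVoteA (rk : PySem.Dict String Int) (use_system_ranking : Bool) (system_name : String)
    (answers : PySem.Dict String Int) (system_sense_key : String) : PySem.Dict String Int :=
  let answers := if answers.contains system_sense_key then answers else answers.insert system_sense_key 0
  if use_system_ranking then
    -- Python raises KeyError here when system_name is missing from system_ranking: excluded by Pre_
    answers.modify system_sense_key 0 (fun v => v + rk.getD system_name 0)
  else
    answers.modify system_sense_key 0 (fun v => v + 1)

-- one iteration of A's 'for system_name, system_predictions in system_data.items()' loop
def pvSysStepA (rk : PySem.Dict String Int) (use_system_ranking : Bool) (g : String)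
    (st : PySem.Dict String Int × PySem.Dict String String)
    (sp : String × List (String × List String)) : PySem.Dict String Int × PySem.Dict String String :=
  match (PySem.Dict.ofList sp.2).get? g with
  | none => st
  | some sks =>
    let answers := sks.foldl (pvVoteA rk use_system_ranking sp.1) st.1
    match PySem.List.max? answers.keys (fun k => answers.getD k 0) with
    | some m => (answers, st.2.insert g m)
    | none => (answers, st.2)  -- Python: ValueError from max() on empty answers; excluded by Pre_

def do_majority_voting (gold_data : List (String × List String)) (system_data : List (String × List (String × List String))) (system_ranking : List (String × Int)) (use_system_ranking : Bool) : List (String × String) :=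
  let rk := PySem.Dict.ofList system_ranking
  ((PySem.Dict.ofList gold_data).items.foldl
    (fun keys gp =>
      ((PySem.Dict.ofList system_data).items.foldl (pvSysStepA rk use_system_ranking gp.1)
        (PySem.Dict.empty, keys)).2)
    PySem.Dict.empty).items

-- ===== PORT B =====
-- one vote of B: weight, then ballots.setdefault(gold_id, []).append((sense_key, weight))
def pvVoteB (rk : PySem.Dict String Int) (use_system_ranking : Bool) (system_name gold_id : String)
    (ballots : PySem.Dict String (List (String × Int))) (sense_key : String) :
    PySem.Dict String (List (String × Int)) :=
  let weight : Int := if use_system_ranking then rk.getD system_name 0 else 1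
  ballots.insert gold_id (ballots.getD gold_id [] ++ [(sense_key, weight)])

-- one iteration of B's 'for gold_id, sense_keys in system_predictions.items()' loop
def pvPredStepB (rk : PySem.Dict String Int) (use_system_ranking : Bool)
    (gd : PySem.Dict String (List String)) (system_name : String)
    (ballots : PySem.Dict String (List (String × Int))) (gp : String × List String) :
    PySem.Dict String (List (String × Int)) :=
  if gd.contains gp.1 then gp.2.foldl (pvVoteB rk use_system_ranking system_name gp.1) ballots
  else ballots

-- one iteration of B's 'for system_name, system_predictions in system_data.items()' loop
def pvSysStepB (rk : PySem.Dict String Int) (use_system_ranking : Bool)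
    (gd : PySem.Dict String (List String))
    (ballots : PySem.Dict String (List (String × Int))) (sp : String × List (String × List String)) :
    PySem.Dict String (List (String × Int)) :=
  (PySem.Dict.ofList sp.2).items.foldl (pvPredStepB rk use_system_ranking gd sp.1) ballots

-- B's candidate-extraction loop: distinct sense keys of the ballot in first-appearance order
def pvCandidates (ballot : List (String × Int)) : List String :=
  ballot.foldl (fun cs p => if cs.contains p.1 then cs else cs ++ [p.1]) []

-- B's score: sum(w for s, w in ballot if s == c)
def pvScore (ballot : List (String × Int)) (c : String) : Int :=
  ballot.foldl (fun a p => if p.1 == c then a + p.2 else a) 0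

def do_majority_voting_alt (gold_data : List (String × List String)) (system_data : List (String × List (String × List String))) (system_ranking : List (String × Int)) (use_system_ranking : Bool) : List (String × String) :=
  let gd := PySem.Dict.ofList gold_data
  let rk := PySem.Dict.ofList system_ranking
  let ballots := (PySem.Dict.ofList system_data).items.foldl (pvSysStepB rk use_system_ranking gd) PySem.Dict.empty
  (gd.items.foldl
    (fun keys gp =>
      match ballots.get? gp.1 with
      | some ballot =>
        match PySem.List.max? (pvCandidates ballot) (pvScore ballot) with
        | some m => keys.insert gp.1 m
        | none => keys  -- unreachable: every stored ballot is nonempty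
      | none => keys)
    PySem.Dict.empty).items

-- ===== PRECONDITION & SPEC =====
-- does the first system whose predictions contain g map it to a nonempty sense-key list?
def pvFirstOkL (l : List (String × List (String × List String))) (g : String) : Bool :=
  match l.find? (fun sp => (PySem.Dict.ofList sp.2).contains g) with
  | some sp => !((PySem.Dict.ofList sp.2).getD g []).isEmpty
  | none => true

-- Pre_ excludes exactly the inputs on which Python A raises: a KeyError (use_system_ranking set and
-- a system that casts a vote is missing from system_ranking) or a ValueError (some gold id's first
-- covering system maps it to an empty sense-key list, so A calls max() on an empty dict).
def Pre_do_majority_voting (gold_data : List (String × List String)) (system_data : List (String × List (String × List String))) (system_ranking : List (String × Int)) (use_system_ranking : Bool) : Prop :=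
  (use_system_ranking = true →
    ∀ sp ∈ (PySem.Dict.ofList system_data).items,
      ((PySem.Dict.ofList sp.2).items.any
        (fun gp => (PySem.Dict.ofList gold_data).contains gp.1 && !gp.2.isEmpty)) = true →
      (PySem.Dict.ofList system_ranking).contains sp.1 = true)
  ∧ (∀ gp ∈ (PySem.Dict.ofList gold_data).items,
      pvFirstOkL (PySem.Dict.ofList system_data).items gp.1 = true)
instance (gold_data : List (String × List String)) (system_data : List (String × List (String × List String))) (system_ranking : List (String × Int)) (use_system_ranking : Bool) : Decidable (Pre_do_majority_voting gold_data system_data system_ranking use_system_ranking) := by unfold Pre_do_majority_voting; infer_instance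

def pvWitness_do_majority_voting : (List (String × List String)) × (List (String × List (String × List String))) × (List (String × Int)) × Bool :=
  ([("d000.s000", ["key1"])], [("sysA", [("d000.s000", ["key1", "key2"])]), ("sysB", [("d000.s000", ["key2"])])], [], false)

def Spec_do_majority_voting (gold_data : List (String × List String)) (system_data : List (String × List (String × List String))) (system_ranking : List (String × Int)) (use_system_ranking : Bool) (out : List (String × String)) : Prop := out = do_majority_voting_alt gold_data system_data system_ranking use_system_ranking
instance (gold_data : List (String × List String)) (system_data : List (String × List (String × List String))) (system_ranking : List (String × Int)) (use_system_ranking : Bool) (out : List (String × String)) : Decidable (Spec_do_majority_voting gold_data system_data system_ranking use_system_ranking out) := by unfold Spec_do_majority_voting; infer_instance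

-- ===== CLAIM (what is proved, stated in full; the proofs are below) =====
def Claim_equal_do_majority_voting : Prop := ∀ (gold_data : List (String × List String)) (system_data : List (String × List (String × List String))) (system_ranking : List (String × Int)) (use_system_ranking : Bool), Dom_do_majority_voting gold_data system_data system_ranking use_system_ranking → Pre_do_majority_voting gold_data system_data system_ranking use_system_ranking → Spec_do_majority_voting gold_data system_data system_ranking use_system_ranking (do_majority_voting gold_data system_data system_ranking use_system_ranking)

-- ===== LEMMAS AND PROOFS =====

-- the weight A adds per vote of system sn (and B computes inline)
def pvW (rk : PySem.Dict String Int) (flag : Bool) (sn : String) : Int :=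
  if flag then rk.getD sn 0 else 1

-- the flat weighted ballot for gold id g contributed by the list of systems l
def pvBallot (rk : PySem.Dict String Int) (flag : Bool) (g : String)
    (l : List (String × List (String × List String))) : List (String × Int) :=
  l.flatMap (fun sp =>
    match (PySem.Dict.ofList sp.2).get? g with
    | none => []
    | some sks => sks.map (fun sk => (sk, pvW rk flag sp.1)))

-- the counter dict obtained by tallying a ballot
def pvTally (bl : List (String × Int)) (a : PySem.Dict String Int) : PySem.Dict String Int :=
  bl.foldl (fun a p => a.insert p.1 (a.getD p.1 0 + p.2)) a

-- A's accumulated answers for gold id g over a list of systems (first components of pvSysStepA)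
def pvAnsFold (rk : PySem.Dict String Int) (flag : Bool) (g : String)
    (l : List (String × List (String × List String))) (a : PySem.Dict String Int) :
    PySem.Dict String Int :=
  l.foldl (fun a sp =>
    match (PySem.Dict.ofList sp.2).get? g with
    | none => a
    | some sks => sks.foldl (pvVoteA rk flag sp.1) a) a

-- the majority key of a nonempty answers dict
def pvMjD (a : PySem.Dict String Int) : String :=
  (PySem.List.max? a.keys (fun k => a.getD k 0)).getD ""

theorem pvVoteA_eq (rk : PySem.Dict String Int) (flag : Bool) (sn : String)
    (a : PySem.Dict String Int) (sk : String) :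
    pvVoteA rk flag sn a sk = a.insert sk (a.getD sk 0 + pvW rk flag sn) := by
  unfold pvVoteA pvW
  by_cases h : a.contains sk = true
  · cases flag <;> simp [h, PySem.Dict.modify]
  · have h0 : a.getD sk 0 = 0 := PySem.Dict.getD_of_not_contains a 0 (by simpa using h)
    cases flag <;>
      simp [h, h0, PySem.Dict.modify, PySem.Dict.getD_insert_self, PySem.Dict.insert_insert_self]

theorem pvItems_ne_of_contains {ν : Type} (d : PySem.Dict String ν) (x : String)
    (h : d.contains x = true) : d.items ≠ [] := by
  have hx : x ∈ d.keys := (PySem.Dict.contains_iff_mem_keys d x).mp h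
  intro he
  simp [PySem.Dict.keys, he] at hx

theorem pvFoldVoteA_contains (rk : PySem.Dict String Int) (flag : Bool) (sn x : String) :
    ∀ (sks : List String) (a : PySem.Dict String Int), a.contains x = true →
      ((sks.foldl (pvVoteA rk flag sn) a).contains x = true) := by
  intro sks
  induction sks with
  | nil => intro a ha; simpa using ha
  | cons sk rest ih =>
    intro a ha
    refine ih _ ?_
    rw [pvVoteA_eq]
    simp [PySem.Dict.contains_insert, ha]

theorem pvAddNonempty (rk : PySem.Dict String Int) (flag : Bool) (sn : String)
    (sks : List String) (a : PySem.Dict String Int)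
    (h : a.items ≠ [] ∨ sks ≠ []) : (sks.foldl (pvVoteA rk flag sn) a).items ≠ [] := by
  cases sks with
  | nil =>
    rcases h with h | h
    · simpa using h
    · simp at h
  | cons sk rest =>
    have hc : ((rest.foldl (pvVoteA rk flag sn) (pvVoteA rk flag sn a sk)).contains sk = true) := by
      refine pvFoldVoteA_contains rk flag sn sk rest _ ?_
      rw [pvVoteA_eq]; simp
    simpa using pvItems_ne_of_contains _ _ hc

theorem pvAnsFold_cons (rk : PySem.Dict String Int) (flag : Bool) (g : String)
    (sp : String × List (String × List String)) (l : List (String × List (String × List String)))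
    (a : PySem.Dict String Int) :
    pvAnsFold rk flag g (sp :: l) a =
      pvAnsFold rk flag g l
        (match (PySem.Dict.ofList sp.2).get? g with
         | none => a
         | some sks => sks.foldl (pvVoteA rk flag sp.1) a) := rfl

theorem pvFirstOkL_cons_neg {sp : String × List (String × List String)}
    {l : List (String × List (String × List String))} {g : String}
    (hc : (PySem.Dict.ofList sp.2).contains g = false) :
    pvFirstOkL (sp :: l) g = pvFirstOkL l g := by
  simp [pvFirstOkL, List.find?_cons_of_neg, hc]

theorem pvFirstOkL_cons_pos {sp : String × List (String × List String)}
    {l : List (String × List (String × List String))} {g : String}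
    (hc : (PySem.Dict.ofList sp.2).contains g = true) :
    pvFirstOkL (sp :: l) g = !((PySem.Dict.ofList sp.2).getD g []).isEmpty := by
  simp [pvFirstOkL, List.find?_cons_of_pos, hc]

theorem pvAnsFold_id (rk : PySem.Dict String Int) (flag : Bool) (g : String) :
    ∀ (l : List (String × List (String × List String))) (a : PySem.Dict String Int),
      l.any (fun sp => (PySem.Dict.ofList sp.2).contains g) = false →
      pvAnsFold rk flag g l a = a := by
  intro l
  induction l with
  | nil => intro a _; rfl
  | cons sp l ih =>
    intro a hany
    simp only [List.any_cons, Bool.or_eq_false_iff] at hany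
    have hn : (PySem.Dict.ofList sp.2).get? g = none := by
      have := hany.1
      rw [PySem.Dict.contains_eq_isSome_get?] at this
      exact Option.not_isSome_iff_eq_none.mp (by simp [this])
    rw [pvAnsFold_cons]
    simp only [hn]
    exact ih _ hany.2

-- A's inner system loop: the keys dict ends up holding the argmax of the full answers
theorem pvInnerA (rk : PySem.Dict String Int) (flag : Bool) (g : String) :
    ∀ (l : List (String × List (String × List String)))
      (ans : PySem.Dict String Int) (keys : PySem.Dict String String),
      (ans.items ≠ [] ∨ pvFirstOkL l g = true) →
      (l.foldl (pvSysStepA rk flag g) (ans, keys)).2 =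
        if l.any (fun sp => (PySem.Dict.ofList sp.2).contains g) then
          keys.insert g (pvMjD (pvAnsFold rk flag g l ans))
        else keys := by
  intro l
  induction l with
  | nil => intro ans keys _; simp
  | cons sp l ih =>
    intro ans keys hyp
    simp only [List.foldl_cons]
    cases h : (PySem.Dict.ofList sp.2).get? g with
    | none =>
      have hc : (PySem.Dict.ofList sp.2).contains g = false := by
        rw [PySem.Dict.contains_eq_isSome_get?, h]; rfl
      have hstep : pvSysStepA rk flag g (ans, keys) sp = (ans, keys) := by
        simp [pvSysStepA, h]
      rw [hstep, ih ans keys ?_, pvAnsFold_cons]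
      · simp only [h, List.any_cons, hc, Bool.false_or]
      · rcases hyp with hne | hfo
        · exact Or.inl hne
        · exact Or.inr (by rwa [pvFirstOkL_cons_neg hc] at hfo)
    | some sks =>
      have hc : (PySem.Dict.ofList sp.2).contains g = true := by
        rw [PySem.Dict.contains_eq_isSome_get?, h]; rfl
      have hne : (sks.foldl (pvVoteA rk flag sp.1) ans).items ≠ [] := by
        rcases hyp with hne | hfo
        · exact pvAddNonempty rk flag sp.1 sks ans (Or.inl hne)
        · refine pvAddNonempty rk flag sp.1 sks ans (Or.inr ?_)
          rw [pvFirstOkL_cons_pos hc, PySem.Dict.getD_eq_get?_getD, h] at hfo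
          simpa using hfo
      have hkeys : (sks.foldl (pvVoteA rk flag sp.1) ans).keys ≠ [] := by
        intro hk
        exact hne (by simpa [PySem.Dict.keys] using hk)
      obtain ⟨m, hm⟩ : ∃ m, PySem.List.max? (sks.foldl (pvVoteA rk flag sp.1) ans).keys
          (fun k => (sks.foldl (pvVoteA rk flag sp.1) ans).getD k 0) = some m := by
        cases hmx : PySem.List.max? (sks.foldl (pvVoteA rk flag sp.1) ans).keys
            (fun k => (sks.foldl (pvVoteA rk flag sp.1) ans).getD k 0) with
        | none => exact absurd ((PySem.List.max?_eq_none_iff _ _).mp hmx) hkeys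
        | some m => exact ⟨m, rfl⟩
      have hstep : pvSysStepA rk flag g (ans, keys) sp =
          (sks.foldl (pvVoteA rk flag sp.1) ans, keys.insert g m) := by
        simp [pvSysStepA, h, hm]
      rw [hstep, ih _ _ (Or.inl hne)]
      have hcons : pvAnsFold rk flag g (sp :: l) ans =
          pvAnsFold rk flag g l (sks.foldl (pvVoteA rk flag sp.1) ans) := by
        rw [pvAnsFold_cons]; simp only [h]
      by_cases hany : l.any (fun sp => (PySem.Dict.ofList sp.2).contains g) = true
      · simp only [hany, if_true, List.any_cons, hc, Bool.true_or, hcons,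
          PySem.Dict.insert_insert_self]
      · have hany' : l.any (fun sp => (PySem.Dict.ofList sp.2).contains g) = false := by
          simpa using hany
        have hid : pvAnsFold rk flag g l (sks.foldl (pvVoteA rk flag sp.1) ans) =
            sks.foldl (pvVoteA rk flag sp.1) ans := pvAnsFold_id rk flag g l _ hany'
        simp [hany', List.any_cons, hc, hcons, hid, pvMjD, hm]

-- pvBallot structural facts
theorem pvBallot_cons (rk : PySem.Dict String Int) (flag : Bool) (g : String)
    (sp : String × List (String × List String)) (l : List (String × List (String × List String))) :
    pvBallot rk flag g (sp :: l) =
      (match (PySem.Dict.ofList sp.2).get? g with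
       | none => []
       | some sks => sks.map (fun sk => (sk, pvW rk flag sp.1))) ++ pvBallot rk flag g l := by
  simp [pvBallot]

theorem pvBallot_nil_of_not_any (rk : PySem.Dict String Int) (flag : Bool) (g : String) :
    ∀ (l : List (String × List (String × List String))),
      l.any (fun sp => (PySem.Dict.ofList sp.2).contains g) = false →
      pvBallot rk flag g l = [] := by
  intro l
  induction l with
  | nil => intro _; rfl
  | cons sp l ih =>
    intro hany
    simp only [List.any_cons, Bool.or_eq_false_iff] at hany
    have hn : (PySem.Dict.ofList sp.2).get? g = none := by
      have := hany.1
      rw [PySem.Dict.contains_eq_isSome_get?] at this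
      exact Option.not_isSome_iff_eq_none.mp (by simp [this])
    rw [pvBallot_cons]
    simp only [hn, List.nil_append]
    exact ih hany.2

theorem pvBallot_ne_of_any (rk : PySem.Dict String Int) (flag : Bool) (g : String) :
    ∀ (l : List (String × List (String × List String))),
      pvFirstOkL l g = true →
      l.any (fun sp => (PySem.Dict.ofList sp.2).contains g) = true →
      pvBallot rk flag g l ≠ [] := by
  intro l
  induction l with
  | nil => intro _ h; simp at h
  | cons sp l ih =>
    intro hfo hany
    cases hc : (PySem.Dict.ofList sp.2).contains g with
    | false =>
      have hn : (PySem.Dict.ofList sp.2).get? g = none := by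
        rw [PySem.Dict.contains_eq_isSome_get?] at hc
        exact Option.not_isSome_iff_eq_none.mp (by simp [hc])
      rw [pvBallot_cons]
      simp only [hn, List.nil_append]
      refine ih ?_ ?_
      · rwa [pvFirstOkL_cons_neg hc] at hfo
      · simpa [hc] using hany
    | true =>
      obtain ⟨sks, h⟩ : ∃ sks, (PySem.Dict.ofList sp.2).get? g = some sks := by
        rw [PySem.Dict.contains_eq_isSome_get?] at hc
        exact Option.isSome_iff_exists.mp hc
      have hsk : sks ≠ [] := by
        rw [pvFirstOkL_cons_pos hc, PySem.Dict.getD_eq_get?_getD, h] at hfo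
        simpa using hfo
      rw [pvBallot_cons]
      simp only [h]
      exact fun he => hsk (List.map_eq_nil_iff.mp ((List.append_eq_nil_iff.mp he).1))

-- A's answers dict IS the tally of the flat ballot
theorem pvFoldVoteA_eq_tally (rk : PySem.Dict String Int) (flag : Bool) (sn : String) :
    ∀ (sks : List String) (a : PySem.Dict String Int),
      sks.foldl (pvVoteA rk flag sn) a =
        pvTally (sks.map (fun sk => (sk, pvW rk flag sn))) a := by
  intro sks
  induction sks with
  | nil => intro a; rfl
  | cons sk rest ih =>
    intro a
    simp only [List.foldl_cons, List.map_cons, pvTally, pvVoteA_eq]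
    exact ih _

theorem pvAnsFold_eq_tally (rk : PySem.Dict String Int) (flag : Bool) (g : String) :
    ∀ (l : List (String × List (String × List String))) (a : PySem.Dict String Int),
      pvAnsFold rk flag g l a = pvTally (pvBallot rk flag g l) a := by
  intro l
  induction l with
  | nil => intro a; rfl
  | cons sp l ih =>
    intro a
    rw [pvAnsFold_cons, pvBallot_cons]
    cases h : (PySem.Dict.ofList sp.2).get? g with
    | none => simpa using ih a
    | some sks =>
      show pvAnsFold rk flag g l (sks.foldl (pvVoteA rk flag sp.1) a) =
        pvTally ((sks.map (fun sk => (sk, pvW rk flag sp.1))) ++ pvBallot rk flag g l) a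
      rw [ih, pvFoldVoteA_eq_tally]
      simp [pvTally, List.foldl_append]

-- keys of the tally = candidates of the ballot (first-appearance order)
theorem pvTally_keys (bl : List (String × Int)) :
    ∀ (a : PySem.Dict String Int),
      (pvTally bl a).keys =
        bl.foldl (fun cs p => if cs.contains p.1 then cs else cs ++ [p.1]) a.keys := by
  induction bl with
  | nil => intro a; rfl
  | cons p rest ih =>
    intro a
    simp only [pvTally, List.foldl_cons]
    rw [show (List.foldl (fun a p => a.insert p.1 (a.getD p.1 0 + p.2)) (a.insert p.1 (a.getD p.1 0 + p.2)) rest) = pvTally rest (a.insert p.1 (a.getD p.1 0 + p.2)) from rfl, ih]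
    congr 1
    by_cases hc : a.contains p.1 = true
    · have hm : a.keys.contains p.1 = true := by
        rw [List.contains_iff_mem]
        exact (PySem.Dict.contains_iff_mem_keys a p.1).mp hc
      rw [PySem.Dict.keys_insert_of_contains _ _ hc, if_pos hm]
    · have hm : ¬ a.keys.contains p.1 = true := by
        intro hm
        rw [List.contains_iff_mem] at hm
        exact hc ((PySem.Dict.contains_iff_mem_keys a p.1).mpr hm)
      rw [PySem.Dict.keys_insert_of_not_contains _ _ (by simpa using hc), if_neg hm]

theorem pvTally_keys_eq_candidates (bl : List (String × Int)) :
    (pvTally bl PySem.Dict.empty).keys = pvCandidates bl := by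
  rw [pvTally_keys]
  rfl

-- the tally's count of any key = B's score scan over the raw ballot
theorem pvScore_shift (c : String) :
    ∀ (bl : List (String × Int)) (x : Int),
      bl.foldl (fun a p => if p.1 == c then a + p.2 else a) x = x + pvScore bl c := by
  intro bl
  induction bl with
  | nil => intro x; simp [pvScore]
  | cons p rest ih =>
    intro x
    simp only [pvScore, List.foldl_cons]
    rw [ih, ih]
    by_cases hb : (p.1 == c) = true
    · rw [if_pos hb, if_pos hb]; ring
    · rw [if_neg hb, if_neg hb]; ring

theorem pvTally_getD (c : String) :
    ∀ (bl : List (String × Int)) (a : PySem.Dict String Int),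
      (pvTally bl a).getD c 0 = a.getD c 0 + pvScore bl c := by
  intro bl
  induction bl with
  | nil => intro a; simp [pvTally, pvScore]
  | cons p rest ih =>
    intro a
    simp only [pvTally, List.foldl_cons]
    rw [show (List.foldl (fun a p => a.insert p.1 (a.getD p.1 0 + p.2)) (a.insert p.1 (a.getD p.1 0 + p.2)) rest) = pvTally rest (a.insert p.1 (a.getD p.1 0 + p.2)) from rfl, ih]
    have hsc : pvScore (p :: rest) c =
        (if p.1 == c then p.2 else 0) + pvScore rest c := by
      simp only [pvScore, List.foldl_cons]
      rw [pvScore_shift, pvScore_shift]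
      by_cases hb : (p.1 == c) = true
      · rw [if_pos hb, if_pos hb]; ring
      · rw [if_neg hb, if_neg hb]; ring
    rw [hsc, PySem.Dict.getD_insert]
    cases hb : (p.1 == c) with
    | true =>
      have he : c = p.1 := (eq_of_beq hb).symm
      rw [if_pos he, if_pos rfl, he]
      ring
    | false =>
      have hne : ¬ (c = p.1) := fun e => by simp [e] at hb
      rw [if_neg hne, if_neg (by simp : ¬ (false = true))]
      ring

-- max? only looks at the key values on list members
theorem pvMax?_congr {α : Type} (f g : α → Int) :
    ∀ (xs : List α) (acc : Option α),
      (∀ x ∈ xs, f x = g x) → (∀ m, acc = some m → f m = g m) →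
      xs.foldl (fun acc x => match acc with
        | none => some x
        | some m => if f m < f x then some x else some m) acc =
      xs.foldl (fun acc x => match acc with
        | none => some x
        | some m => if g m < g x then some x else some m) acc := by
  intro xs
  induction xs with
  | nil => intro acc _ _; rfl
  | cons x rest ih =>
    intro acc hxs hacc
    simp only [List.foldl_cons]
    have hx : f x = g x := hxs x List.mem_cons_self
    have hrest : ∀ y ∈ rest, f y = g y := fun y hy => hxs y (List.mem_cons_of_mem _ hy)
    cases acc with
    | none => exact ih (some x) hrest (by intro m hm; cases hm; exact hx)
    | some m =>
      have hm : f m = g m := hacc m rfl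
      show rest.foldl _ (if f m < f x then some x else some m) =
        rest.foldl _ (if g m < g x then some x else some m)
      rw [hm, hx]
      by_cases h : g m < g x
      · rw [if_pos h]
        exact ih (some x) hrest (by intro m' hm'; cases hm'; exact hx)
      · rw [if_neg h]
        exact ih (some m) hrest (by intro m' hm'; cases hm'; exact hm)

theorem pvMax?_tally_eq (bl : List (String × Int)) :
    PySem.List.max? (pvTally bl PySem.Dict.empty).keys
      (fun k => (pvTally bl PySem.Dict.empty).getD k 0) =
    PySem.List.max? (pvCandidates bl) (pvScore bl) := by
  rw [pvTally_keys_eq_candidates]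
  show List.foldl _ none (pvCandidates bl) = List.foldl _ none (pvCandidates bl)
  exact pvMax?_congr _ _ (pvCandidates bl) none
    (fun c _ => by rw [pvTally_getD]; simp [PySem.Dict.getD_empty])
    (by intro m hm; cases hm)

-- candidates of a nonempty ballot are nonempty
theorem pvCandidates_ne (bl : List (String × Int)) (h : bl ≠ []) : pvCandidates bl ≠ [] := by
  have key : ∀ (l : List (String × Int)) (cs : List String), cs ≠ [] →
      l.foldl (fun cs p => if cs.contains p.1 then cs else cs ++ [p.1]) cs ≠ [] := by
    intro l
    induction l with
    | nil => intro cs h; simpa using h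
    | cons p rest ih =>
      intro cs hcs
      simp only [List.foldl_cons]
      by_cases hc : cs.contains p.1 = true
      · simp only [hc, if_true]; exact ih cs hcs
      · simp only [hc, Bool.false_eq_true, if_false]
        exact ih _ (by simp)
  cases bl with
  | nil => exact absurd rfl h
  | cons p rest =>
    simp only [pvCandidates, List.foldl_cons, List.contains_nil, Bool.false_eq_true, if_false,
      List.nil_append]
    exact key rest [p.1] (by simp)

-- B: a sense-key loop for gold id g appends its votes to g's ballot
theorem pvB_skfold (rk : PySem.Dict String Int) (flag : Bool) (sn g : String) :
    ∀ (sks : List String) (ballots : PySem.Dict String (List (String × Int))),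
      (sks.foldl (pvVoteB rk flag sn g) ballots).get? g =
        if sks.isEmpty then ballots.get? g
        else some (ballots.getD g [] ++ sks.map (fun sk => (sk, pvW rk flag sn))) := by
  intro sks
  induction sks with
  | nil => intro ballots; simp
  | cons sk rest ih =>
    intro ballots
    have hstep : pvVoteB rk flag sn g ballots sk =
        ballots.insert g (ballots.getD g [] ++ [(sk, pvW rk flag sn)]) := rfl
    simp only [List.foldl_cons, hstep, ih, PySem.Dict.get?_insert_self,
      PySem.Dict.getD_insert_self]
    cases rest <;> simp

theorem pvB_skfold_ne (rk : PySem.Dict String Int) (flag : Bool) (sn g g' : String) (hne : g' ≠ g) :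
    ∀ (sks : List String) (ballots : PySem.Dict String (List (String × Int))),
      (sks.foldl (pvVoteB rk flag sn g) ballots).get? g' = ballots.get? g' := by
  intro sks
  induction sks with
  | nil => intro ballots; rfl
  | cons sk rest ih =>
    intro ballots
    simp only [List.foldl_cons, ih, pvVoteB]
    exact PySem.Dict.get?_insert_of_ne _ _ hne

theorem pvB_predfold_ne (rk : PySem.Dict String Int) (flag : Bool)
    (gd : PySem.Dict String (List String)) (sn g : String) :
    ∀ (pl : List (String × List String)) (ballots : PySem.Dict String (List (String × Int))),
      (∀ p ∈ pl, p.1 ≠ g) →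
      (pl.foldl (pvPredStepB rk flag gd sn) ballots).get? g = ballots.get? g := by
  intro pl
  induction pl with
  | nil => intro ballots _; rfl
  | cons p rest ih =>
    intro ballots hpl
    simp only [List.foldl_cons]
    rw [ih _ (fun q hq => hpl q (List.mem_cons_of_mem _ hq))]
    unfold pvPredStepB
    by_cases hgd : gd.contains p.1 = true
    · simp only [hgd, if_true]
      exact pvB_skfold_ne rk flag sn p.1 g (Ne.symm (hpl p List.mem_cons_self)) _ ballots
    · simp [hgd]

-- B: one system's prediction loop, observed at gold id g
theorem pvB_predfold (rk : PySem.Dict String Int) (flag : Bool)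
    (gd : PySem.Dict String (List String)) (sn g : String) (hg : gd.contains g = true) :
    ∀ (pl : List (String × List String)) (ballots : PySem.Dict String (List (String × Int))),
      (pl.map (fun p => p.1)).Nodup →
      (pl.foldl (pvPredStepB rk flag gd sn) ballots).get? g =
        match (pl.find? (fun p => p.1 == g)).map (fun p => p.2) with
        | none => ballots.get? g
        | some sks =>
          if sks.isEmpty then ballots.get? g
          else some (ballots.getD g [] ++ sks.map (fun sk => (sk, pvW rk flag sn))) := by
  intro pl
  induction pl with
  | nil => intro ballots _; rfl
  | cons p rest ih =>
    intro ballots hnd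
    rw [List.map_cons, List.nodup_cons] at hnd
    simp only [List.foldl_cons]
    cases hb : (p.1 == g) with
    | true =>
      have hpg : p.1 = g := eq_of_beq hb
      have hrest : ∀ q ∈ rest, q.1 ≠ g := by
        intro q hq hqg
        exact hnd.1 (List.mem_map.mpr ⟨q, hq, by rw [hqg, hpg]⟩)
      have hstep : pvPredStepB rk flag gd sn ballots p =
          p.2.foldl (pvVoteB rk flag sn g) ballots := by
        unfold pvPredStepB
        rw [hpg]
        simp [hg]
      have hf : List.find? (fun q => q.1 == g) (p :: rest) = some p :=
        List.find?_cons_of_pos (by simpa using hb)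
      rw [hstep, pvB_predfold_ne rk flag gd sn g rest _ hrest, pvB_skfold, hf]
      rfl
    | false =>
      have hpg : g ≠ p.1 := fun hgp => by simp [hgp] at hb
      have hpres : (pvPredStepB rk flag gd sn ballots p).get? g = ballots.get? g := by
        unfold pvPredStepB
        by_cases hgd : gd.contains p.1 = true
        · simp only [hgd, if_true]
          exact pvB_skfold_ne rk flag sn p.1 g hpg _ ballots
        · simp [hgd]
      have hpresD : (pvPredStepB rk flag gd sn ballots p).getD g [] = ballots.getD g [] := by
        rw [PySem.Dict.getD_eq_get?_getD, hpres, ← PySem.Dict.getD_eq_get?_getD]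
      rw [List.find?_cons_of_neg (by simp [hb])]
      have := ih (pvPredStepB rk flag gd sn ballots p) hnd.2
      rw [this, hpres, hpresD]

-- B: the whole ballot-building pass, observed at gold id g, collects the flat ballot
theorem pvB_main (rk : PySem.Dict String Int) (flag : Bool)
    (gd : PySem.Dict String (List String)) (g : String) (hg : gd.contains g = true) :
    ∀ (l : List (String × List (String × List String)))
      (ballots : PySem.Dict String (List (String × Int))) (bl : List (String × Int)),
      ballots.get? g = (if bl = [] then none else some bl) →
      (l.foldl (pvSysStepB rk flag gd) ballots).get? g =
        (if bl ++ pvBallot rk flag g l = [] then none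
         else some (bl ++ pvBallot rk flag g l)) := by
  intro l
  induction l with
  | nil => intro ballots bl hinv; simpa [pvBallot] using hinv
  | cons sp l ih =>
    intro ballots bl hinv
    have hnd : ((PySem.Dict.ofList sp.2).items.map (fun p => p.1)).Nodup := by
      have := PySem.Dict.nodup_keys_ofList (κ := String) (ν := List String) sp.2
      simpa [PySem.Dict.keys] using this
    have hstep : (pvSysStepB rk flag gd ballots sp).get? g =
        match ((PySem.Dict.ofList sp.2).items.find? (fun p => p.1 == g)).map (fun p => p.2) with
        | none => ballots.get? g
        | some sks =>
          if sks.isEmpty then ballots.get? g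
          else some (ballots.getD g [] ++ sks.map (fun sk => (sk, pvW rk flag sp.1))) :=
      pvB_predfold rk flag gd sp.1 g hg _ ballots hnd
    have hfind : ((PySem.Dict.ofList sp.2).items.find? (fun p => p.1 == g)).map (fun p => p.2) =
        (PySem.Dict.ofList sp.2).get? g := rfl
    rw [hfind] at hstep
    simp only [List.foldl_cons]
    rw [pvBallot_cons]
    cases h : (PySem.Dict.ofList sp.2).get? g with
    | none =>
      simp only [h] at hstep ⊢
      simp only [List.nil_append]
      exact ih _ bl (by rw [hstep]; exact hinv)
    | some sks =>
      cases sks with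
      | nil =>
        simp only [h, List.isEmpty_nil, if_true, List.map_nil, List.nil_append] at hstep ⊢
        exact ih _ bl (by rw [hstep]; exact hinv)
      | cons sk rest =>
        have hbase : ballots.getD g [] = bl := by
          rw [PySem.Dict.getD_eq_get?_getD, hinv]
          by_cases he : bl = [] <;> simp [he]
        have hne : bl ++ (sk :: rest).map (fun sk => (sk, pvW rk flag sp.1)) ≠ [] := by simp
        simp only [h, List.isEmpty_cons, if_false, hbase, Bool.false_eq_true] at hstep ⊢
        rw [← List.append_assoc]
        exact ih (pvSysStepB rk flag gd ballots sp)
          (bl ++ (sk :: rest).map (fun sk => (sk, pvW rk flag sp.1)))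
          (by rw [hstep, if_neg hne])

-- ===== VERDICT (by name: the statement is the Claim_ definition above) =====
theorem do_majority_voting_spec : Claim_equal_do_majority_voting := by
  unfold Claim_equal_do_majority_voting
  intro gold_data system_data system_ranking use_system_ranking _ hpre
  unfold Spec_do_majority_voting
  unfold do_majority_voting do_majority_voting_alt
  simp only []
  congr 1
  refine PySem.List.foldl_congr_mem _ _ _ _ ?_
  intro keys gp hgp
  have hg : (PySem.Dict.ofList gold_data).contains gp.1 = true := by
    rw [PySem.Dict.contains_iff_mem_keys]
    simp only [PySem.Dict.keys]
    exact List.mem_map_of_mem hgp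
  have hfo := hpre.2 gp hgp
  rw [pvInnerA (PySem.Dict.ofList system_ranking) use_system_ranking gp.1
    (PySem.Dict.ofList system_data).items PySem.Dict.empty keys (Or.inr hfo)]
  have hv := pvB_main (PySem.Dict.ofList system_ranking) use_system_ranking
    (PySem.Dict.ofList gold_data) gp.1 hg (PySem.Dict.ofList system_data).items
    PySem.Dict.empty [] (by rfl)
  simp only [List.nil_append] at hv
  rw [hv]
  by_cases hbl : pvBallot (PySem.Dict.ofList system_ranking) use_system_ranking gp.1
      (PySem.Dict.ofList system_data).items = []
  · have hany : (PySem.Dict.ofList system_data).items.any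
        (fun sp => (PySem.Dict.ofList sp.2).contains gp.1) = false := by
      by_contra hany
      exact pvBallot_ne_of_any (PySem.Dict.ofList system_ranking) use_system_ranking
        gp.1 _ hfo (by simpa using hany) hbl
    simp [hbl, hany]
  · have hany : (PySem.Dict.ofList system_data).items.any
        (fun sp => (PySem.Dict.ofList sp.2).contains gp.1) = true := by
      by_contra hany
      exact hbl (pvBallot_nil_of_not_any _ _ _ _ (by simpa using hany))
    obtain ⟨m, hm⟩ : ∃ m, PySem.List.max?
        (pvCandidates (pvBallot (PySem.Dict.ofList system_ranking) use_system_ranking gp.1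
          (PySem.Dict.ofList system_data).items))
        (pvScore (pvBallot (PySem.Dict.ofList system_ranking) use_system_ranking gp.1
          (PySem.Dict.ofList system_data).items)) = some m := by
      cases hmx : PySem.List.max?
          (pvCandidates (pvBallot (PySem.Dict.ofList system_ranking) use_system_ranking gp.1
            (PySem.Dict.ofList system_data).items))
          (pvScore (pvBallot (PySem.Dict.ofList system_ranking) use_system_ranking gp.1
            (PySem.Dict.ofList system_data).items)) with
      | none =>
        exact absurd ((PySem.List.max?_eq_none_iff _ _).mp hmx) (pvCandidates_ne _ hbl)
      | some m => exact ⟨m, rfl⟩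
    have hmj : pvMjD (pvAnsFold (PySem.Dict.ofList system_ranking) use_system_ranking gp.1
        (PySem.Dict.ofList system_data).items PySem.Dict.empty) = m := by
      unfold pvMjD
      rw [pvAnsFold_eq_tally, pvMax?_tally_eq, hm]
      rfl
    simp [hbl, hany, hmj, hm]
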